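-- pv_equiv track=rewrite | github.com/gabriellaec/desoft-analise-exercicios | backup/user_371/ch55_2020_10_07_11_55_03_647797.py | encontra_maximo
-- ===== SOURCE A (Python) =====
-- def encontra_maximo(lista):
--     lista1=lista[0]
--     lista2=lista[1]
--     lista3=lista[2]
--     i=0
--     termo_anterior=0
--     while len(lista1)>i:
--         if termo_anterior<lista1[i]:
--             termo_anterior=lista1[i]
--             i+=1
--         else:
--             i+=1
--     i=0
--     while len(lista2)>i:
--         if termo_anterior<lista2[i]:
--             termo_anterior=lista2[i]
--             i+=1
--         else:
--             i+=1
--     i=0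
--     while len(lista3)>i:
--         if termo_anterior<lista3[i]:
--             termo_anterior=lista3[i]
--             i+=1
--         else:
--             i+=1
--     return termo_anterior
-- ===== SOURCE B (Python) =====
-- def encontra_maximo(lista):
--     todos = sorted(lista[0] + lista[1] + lista[2] + [0])
--     return todos[-1]
-- ===== Notes on version B (the rewrite author's own statement) =====
-- stated objective: alternative
-- what changed: Replaces the three index-driven running-max while-loops with concatenating the sublists plus the 0 baseline, sorting the combined list, and returning its last element.
import Mathlib
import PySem

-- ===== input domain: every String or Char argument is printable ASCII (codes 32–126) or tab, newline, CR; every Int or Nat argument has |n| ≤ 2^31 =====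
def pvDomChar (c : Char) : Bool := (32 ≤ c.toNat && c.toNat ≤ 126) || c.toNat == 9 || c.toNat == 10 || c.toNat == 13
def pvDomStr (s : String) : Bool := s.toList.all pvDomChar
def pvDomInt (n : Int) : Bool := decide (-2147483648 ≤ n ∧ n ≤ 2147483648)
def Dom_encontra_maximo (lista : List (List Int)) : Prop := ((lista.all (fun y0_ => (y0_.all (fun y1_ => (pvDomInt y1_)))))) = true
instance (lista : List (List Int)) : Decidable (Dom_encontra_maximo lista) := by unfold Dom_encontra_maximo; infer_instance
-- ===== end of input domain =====

-- B concatenates the three sublists with the 0 baseline, sorts the combined list and returns its last element, replacing A's three index-driven running-max loops (alternative algorithm; return-value equivalence).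


-- ===== PORT A =====
-- the 'while len(l)>i' running-max loop of A, index-free fold over the same state
def pvRunMax (acc : Int) (l : List Int) : Int :=
  l.foldl (fun termo x => if termo < x then x else termo) acc

def encontra_maximo (lista : List (List Int)) : Int :=
  let lista1 := (PySem.List.pyGet? lista 0).getD []
  let lista2 := (PySem.List.pyGet? lista 1).getD []
  let lista3 := (PySem.List.pyGet? lista 2).getD []
  pvRunMax (pvRunMax (pvRunMax 0 lista1) lista2) lista3

-- ===== PORT B =====
-- todos = sorted(lista[0]+lista[1]+lista[2]+[0]); return todos[-1]
-- todos is never empty (it contains 0), so the pyGetD default is unreachable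
def encontra_maximo_alt (lista : List (List Int)) : Int :=
  let todos := PySem.List.sorted
      ((PySem.List.pyGet? lista 0).getD [] ++ (PySem.List.pyGet? lista 1).getD []
        ++ (PySem.List.pyGet? lista 2).getD [] ++ [0]) (fun x => x) false
  PySem.List.pyGetD todos (-1) 0

-- ===== PRECONDITION & SPEC =====
-- A indexes lista[0], lista[1], lista[2]: fewer than three sublists raises IndexError (B raises too)
def Pre_encontra_maximo (lista : List (List Int)) : Prop := 3 ≤ lista.length
instance (lista : List (List Int)) : Decidable (Pre_encontra_maximo lista) := by unfold Pre_encontra_maximo; infer_instance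
def pvWitness_encontra_maximo : List (List Int) := [[1, -2], [], [3]]

def Spec_encontra_maximo (lista : List (List Int)) (out : Int) : Prop := out = encontra_maximo_alt lista
instance (lista : List (List Int)) (out : Int) : Decidable (Spec_encontra_maximo lista out) := by unfold Spec_encontra_maximo; infer_instance

-- ===== CLAIM (what is proved, stated in full; the proofs are below) =====
def Claim_equal_encontra_maximo : Prop := ∀ (lista : List (List Int)), Dom_encontra_maximo lista → Pre_encontra_maximo lista → Spec_encontra_maximo lista (encontra_maximo lista)

-- ===== LEMMAS AND PROOFS =====
theorem pvRunMax_eq_foldl_max (l : List Int) (acc : Int) :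
    pvRunMax acc l = l.foldl max acc := by
  induction l generalizing acc with
  | nil => rfl
  | cons x t ih =>
    simp only [pvRunMax, List.foldl] at *
    rw [ih]
    congr 1
    omega

-- the seed never exceeds a foldl max over it
theorem le_foldl_max (l : List Int) (a : Int) : a ≤ l.foldl max a := by
  induction l generalizing a with
  | nil => exact le_refl a
  | cons x t ih => exact le_trans (le_max_left a x) (ih (max a x))

-- folding max over a permuted list gives the same result
theorem foldl_max_perm {l₁ l₂ : List Int} (p : l₁.Perm l₂) (a : Int) :
    l₁.foldl max a = l₂.foldl max a := by
  induction p generalizing a with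
  | nil => rfl
  | cons x _ ih => simp only [List.foldl]; exact ih _
  | swap x y l =>
    simp only [List.foldl]
    congr 1
    omega
  | trans _ _ ih₁ ih₂ => exact (ih₁ a).trans (ih₂ a)

-- on a sorted (pairwise ≤) nonempty list, foldl max collapses to the last element
theorem foldl_max_sorted (x : Int) (t : List Int)
    (h : (x :: t).Pairwise (· ≤ ·)) (a : Int) :
    List.foldl max a (x :: t) = max a ((x :: t).getLast (List.cons_ne_nil x t)) := by
  induction t generalizing x a with
  | nil => rfl
  | cons y t' ih =>
    have hx : x ≤ y := (List.pairwise_cons.mp h).1 y (List.mem_cons_self)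
    have htail : (y :: t').Pairwise (· ≤ ·) := (List.pairwise_cons.mp h).2
    have hxL : x ≤ (y :: t').getLast (List.cons_ne_nil y t') := by
      rcases (List.pairwise_cons.mp h).1 _ (List.getLast_mem (List.cons_ne_nil y t')) with hle
      exact hle
    have := ih y htail (max a x)
    simp only [List.foldl] at this ⊢
    rw [this]
    have : (x :: y :: t').getLast (List.cons_ne_nil x (y :: t'))
        = (y :: t').getLast (List.cons_ne_nil y t') := by
      simp [List.getLast_cons]
    rw [this]
    omega

-- ===== VERDICT (by name: the statement is the Claim_ definition above) =====
theorem encontra_maximo_spec : Claim_equal_encontra_maximo := by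
  intro lista _ hpre
  match lista, hpre with
  | l1 :: l2 :: l3 :: rest, _ =>
    show encontra_maximo _ = encontra_maximo_alt _
    have hg0 : PySem.List.pyGet? (l1 :: l2 :: l3 :: rest) 0 = some l1 := by
      rw [show (0 : Int) = ((0 : Nat) : Int) from rfl, PySem.List.pyGet?_natCast]; simp
    have hg1 : PySem.List.pyGet? (l1 :: l2 :: l3 :: rest) 1 = some l2 := by
      rw [show (1 : Int) = ((1 : Nat) : Int) from rfl, PySem.List.pyGet?_natCast]; simp
    have hg2 : PySem.List.pyGet? (l1 :: l2 :: l3 :: rest) 2 = some l3 := by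
      rw [show (2 : Int) = ((2 : Nat) : Int) from rfl, PySem.List.pyGet?_natCast]; simp
    simp only [encontra_maximo, encontra_maximo_alt, hg0, hg1, hg2, Option.getD_some]
    rw [pvRunMax_eq_foldl_max, pvRunMax_eq_foldl_max, pvRunMax_eq_foldl_max,
      ← List.foldl_append, ← List.foldl_append]
    -- name the combined list and its sort
    set c : List Int := l1 ++ l2 ++ l3 ++ [0] with hc
    have hne : c ≠ [] := by
      intro hnil
      have : ([] : List Int).length = c.length := by rw [hnil]
      simp [hc] at this
    have hperm : (PySem.List.sorted c (fun x => x) false).Perm c :=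
      PySem.List.sorted_perm c (fun x => x) false
    have hsne : PySem.List.sorted c (fun x => x) false ≠ [] := by
      intro hnil
      have := hperm.length_eq
      rw [hnil] at this
      simp [hc] at this
    rw [PySem.List.pyGetD_neg_one _ _ hsne]
    -- A's fold over l1++l2++l3 equals the fold over c (the extra 0 is absorbed by the seed 0)
    have hfold : (l1 ++ (l2 ++ l3)).foldl max 0 = c.foldl max 0 := by
      simp [hc, List.foldl_append]
      exact le_trans (le_trans (le_foldl_max l1 0) (le_foldl_max l2 _)) (le_foldl_max l3 _)
    rw [hfold, ← foldl_max_perm hperm 0]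
    obtain ⟨x, t, hxt⟩ := List.exists_cons_of_ne_nil hsne
    have hpw : (PySem.List.sorted c (fun x => x) false).Pairwise (· ≤ ·) := by
      have := PySem.List.sorted_pairwise c (fun x => x)
      simpa using this
    simp only [hxt] at hpw ⊢
    rw [foldl_max_sorted x t hpw 0]
    -- 0 ∈ sorted c, so 0 ≤ last element
    have h0mem : (0 : Int) ∈ x :: t := by
      rw [← hxt]
      exact (PySem.List.mem_sorted _ _ _ _).mpr (by simp [hc])
    have hlast : (0 : Int) ≤ (x :: t).getLast (List.cons_ne_nil x t) := by
      have hs : ∀ y ∈ x :: t, ∀ z ∈ x :: t, y ≤ z ∨ z ≤ y := by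
        intro y _ z _; omega
      -- in a pairwise-≤ list every member is ≤ the last element
      have : ∀ (l : List Int) (h : l ≠ []), l.Pairwise (· ≤ ·) → ∀ y ∈ l, y ≤ l.getLast h := by
        intro l
        induction l with
        | nil => intro h; exact absurd rfl h
        | cons a t' ih =>
          intro _ hp y hy
          rcases List.mem_cons.mp hy with rfl | hy'
          · cases t' with
            | nil => simp
            | cons b t'' =>
              rw [List.getLast_cons (List.cons_ne_nil b t'')]
              exact (List.pairwise_cons.mp hp).1 _ (List.getLast_mem _)
          · have hne' : t' ≠ [] := List.ne_nil_of_mem hy'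
            rw [List.getLast_cons hne']
            exact ih hne' (List.pairwise_cons.mp hp).2 y hy'
      exact this (x :: t) (List.cons_ne_nil x t) hpw 0 h0mem
    omega
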